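-- pv_equiv track=rewrite | github.com/sgpirsquare/BaekJoonSolutions | 프로그래머스/0/181874. A 강조하기/A 강조하기.py | solution
-- ===== SOURCE A (Python) =====
-- def solution(myString):
--     answer=list(myString)
--     for i in range(len(answer)):
--         if answer[i]=='a' or answer[i]=='A':
--             answer[i]='A'
--         else:
--             answer[i]=answer[i].lower()
--
--     answer = ''.join(answer)
--     return answer
-- ===== SOURCE B (Python) =====
-- def solution(myString):
--     return myString.lower().replace('a', 'A')
-- ===== Notes on version B (the rewrite author's own statement) =====
-- stated objective: idiomatic
-- what changed: Replaces the per-index loop with a branch and manual join by two whole-string library passes: lowercase everything, then replace the target letter with its uppercase form.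
import Mathlib
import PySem

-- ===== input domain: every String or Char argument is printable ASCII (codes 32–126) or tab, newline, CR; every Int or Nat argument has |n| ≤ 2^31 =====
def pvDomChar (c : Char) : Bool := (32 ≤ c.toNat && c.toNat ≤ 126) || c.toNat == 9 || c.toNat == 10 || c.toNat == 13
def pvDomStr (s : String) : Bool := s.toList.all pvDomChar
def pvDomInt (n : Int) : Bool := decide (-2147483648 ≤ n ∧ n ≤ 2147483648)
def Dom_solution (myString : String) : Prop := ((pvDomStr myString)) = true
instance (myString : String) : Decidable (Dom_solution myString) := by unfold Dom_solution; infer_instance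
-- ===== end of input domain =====

-- B replaces A's per-character loop with branch and manual join by two whole-string
-- library passes (lower everything, then replace 'a' by 'A'); objective: idiomatic.

-- ===== PORT A =====
-- the for-loop over indices rewriting each cell in place, as the obvious structural
-- recursion over the character list; the final ''.join is String.mk
def solutionGo : List Char → List Char
  | [] => []
  | c :: t => (if c = 'a' ∨ c = 'A' then 'A' else PySem.Chars.lowerChar c) :: solutionGo t

def solution (myString : String) : String := String.ofList (solutionGo myString.toList)

-- ===== PORT B =====
def solution_alt (myString : String) : String :=
  PySem.Str.replace (PySem.Str.lower myString) "a" "A"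

-- ===== PRECONDITION & SPEC =====
def Spec_solution (myString : String) (out : String) : Prop := out = solution_alt myString
instance (myString : String) (out : String) : Decidable (Spec_solution myString out) := by unfold Spec_solution; infer_instance

-- ===== CLAIM (what is proved, stated in full; the proofs are below) =====
def Claim_equal_solution : Prop := ∀ (myString : String), Dom_solution myString → Spec_solution myString (solution myString)

-- ===== LEMMAS AND PROOFS =====

-- replacing the single character 'a' by 'A' is the pointwise map
theorem replace_go_single (fuel : Nat) (l acc : List Char) (h : l.length ≤ fuel) :
    PySem.Chars.replace.go ['a'] ['A'] fuel l acc
      = acc.reverse ++ l.map (fun c => if c = 'a' then 'A' else c) := by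
  induction fuel generalizing l acc with
  | zero =>
    have : l = [] := List.eq_nil_of_length_eq_zero (Nat.le_zero.mp h)
    subst this
    simp [PySem.Chars.replace.go]
  | succ fuel ih =>
    cases l with
    | nil => simp [PySem.Chars.replace.go]
    | cons c t =>
      rw [PySem.Chars.replace.go]
      by_cases hc : c = 'a'
      · subst hc
        have hpre : ['a'].isPrefixOf ('a' :: t) = true := by simp [List.isPrefixOf]
        simp only [hpre, if_pos]
        rw [show List.drop ['a'].length ('a' :: t) = t from rfl,
            show ['A'].reverse ++ acc = 'A' :: acc from rfl]
        rw [ih t ('A' :: acc) (by simpa using Nat.le_of_succ_le_succ h)]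
        simp
      · have hpre : ['a'].isPrefixOf (c :: t) = false := by
          simp [List.isPrefixOf]; exact fun hh => hc hh.symm
        simp only [hpre]
        rw [if_neg (by simp)]
        rw [ih t (c :: acc) (by simpa using Nat.le_of_succ_le_succ h)]
        simp [hc]

theorem toNat_ofNat_of_lt (n : Nat) (h : n < 55296) : (Char.ofNat n).toNat = n := by
  unfold Char.ofNat
  rw [dif_pos (Or.inl h)]
  simp [Char.ofNatAux, Char.toNat]

theorem lowerChar_ne_a (c : Char) (h : c ≠ 'a') (h2 : c ≠ 'A') :
    PySem.Chars.lowerChar c ≠ 'a' := by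
  unfold PySem.Chars.lowerChar PySem.Chars.isupper
  split
  · rename_i hu
    simp at hu
    have h65 : 65 ≤ c.toNat := by exact_mod_cast hu.1
    have h90 : c.toNat ≤ 90 := by exact_mod_cast hu.2
    intro he
    have h97 : (Char.ofNat (c.toNat + 32)).toNat = 97 := by rw [he]; decide
    rw [toNat_ofNat_of_lt _ (by omega)] at h97
    apply h2
    apply Char.ext
    apply UInt32.toNat_inj.mp
    show c.toNat = 'A'.toNat
    have hA : 'A'.toNat = 65 := rfl
    omega
  · exact h

theorem step_eq (c : Char) :
    (if PySem.Chars.lowerChar c = 'a' then 'A' else PySem.Chars.lowerChar c)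
      = (if c = 'a' ∨ c = 'A' then 'A' else PySem.Chars.lowerChar c) := by
  by_cases h : c = 'a'
  · subst h; decide
  · by_cases h2 : c = 'A'
    · subst h2; decide
    · rw [if_neg (lowerChar_ne_a c h h2), if_neg (by tauto)]

theorem solutionGo_eq_map (l : List Char) :
    solutionGo l = l.map (fun c => if c = 'a' ∨ c = 'A' then 'A' else PySem.Chars.lowerChar c) := by
  induction l with
  | nil => rfl
  | cons c t ih => simp [solutionGo, ih]

-- ===== VERDICT (by name: the statement is the Claim_ definition above) =====
theorem solution_spec : Claim_equal_solution := by
  intro s _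
  unfold Spec_solution solution solution_alt
  apply String.toList_inj.mp
  rw [PySem.Str.toList_replace, PySem.Str.toList_lower]
  show _ = PySem.Chars.replace (PySem.Chars.lower s.toList) ['a'] ['A']
  unfold PySem.Chars.replace
  rw [if_neg (by simp)]
  rw [replace_go_single _ _ _ (by simp [PySem.Chars.lower])]
  simp only [List.reverse_nil, List.nil_append, PySem.Chars.lower, List.map_map,
    solutionGo_eq_map, String.toList_ofList]
  apply List.map_congr_left
  intro c _
  exact (step_eq c).symm
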